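-- pv_equiv track=rewrite | github.com/fahmedtech/Python-Courses | CSC241. Intro Python/CSC241. Labs (4)/Py-Lab 4 CSC241.py | FindMinRow
-- ===== SOURCE A (Python) =====
-- def FindMinRow(lists):
--     if(len(lists) == 0):
--         return -1
--
--     index = 0
--     initialSum = sum(lists[0])
--
--     for i in range(1, len(lists)):
--         if(sum(lists[i]) < initialSum):
--
--            initialSum = sum(lists[i])
--            index = i
--
--     return index
-- ===== SOURCE B (Python) =====
-- def FindMinRow(lists):
--     sums = [sum(r) for r in lists]
--     if not sums:
--         return -1
--     return sums.index(min(sums))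
-- ===== Notes on version B (the rewrite author's own statement) =====
-- stated objective: simpler
-- what changed: Replaces the fused index-tracking scan with a table-then-lookup decomposition: precompute all row sums, then take min() and locate its first index with .index().
import Mathlib
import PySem

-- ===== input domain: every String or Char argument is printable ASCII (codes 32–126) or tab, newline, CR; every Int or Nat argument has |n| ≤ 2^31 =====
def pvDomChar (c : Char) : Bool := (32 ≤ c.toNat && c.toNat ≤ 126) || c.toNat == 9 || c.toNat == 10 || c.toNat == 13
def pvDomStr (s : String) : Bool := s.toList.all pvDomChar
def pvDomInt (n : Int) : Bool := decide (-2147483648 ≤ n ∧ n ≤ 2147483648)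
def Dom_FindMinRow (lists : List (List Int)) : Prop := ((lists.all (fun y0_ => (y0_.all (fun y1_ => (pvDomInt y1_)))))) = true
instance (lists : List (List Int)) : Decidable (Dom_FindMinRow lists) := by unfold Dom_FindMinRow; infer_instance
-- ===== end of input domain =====

-- B replaces A's single fused scan (running minimum + its index) with a table-then-lookup
-- decomposition: build the list of row sums once, then min() and .index() in two separate passes.

-- ===== PORT A =====
-- literal port of A: guard for the empty list, then a loop over range(1, len(lists))
-- tracking (index, initialSum); lists[i] is always in range here, so pyGetD's default is never used.
def FindMinRow (lists : List (List Int)) : Int :=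
  if lists.length == 0 then -1
  else
    let initialSum : Int := (PySem.List.pyGetD lists 0 []).sum
    let st := (PySem.List.pyRange 1 (lists.length : Int) 1).foldl
      (fun (st : Int × Int) i =>
        if (PySem.List.pyGetD lists i []).sum < st.2
        then (i, (PySem.List.pyGetD lists i []).sum)
        else st)
      ((0 : Int), initialSum)
    st.1

-- ===== PORT B =====
-- port of Source B: sums table, then min(), then .index(); min(sums) is a member of sums,
-- so .index never raises (the none branch is unreachable).
def FindMinRow_alt (lists : List (List Int)) : Int :=
  let sums := lists.map List.sum
  match PySem.List.min? sums (fun x => x) with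
  | none => -1
  | some m =>
    match PySem.List.index? sums m with
    | some k => (k : Int)
    | none => -1

-- ===== PRECONDITION & SPEC =====
def Spec_FindMinRow (lists : List (List Int)) (out : Int) : Prop := out = FindMinRow_alt lists
instance (lists : List (List Int)) (out : Int) : Decidable (Spec_FindMinRow lists out) := by unfold Spec_FindMinRow; infer_instance

-- ===== CLAIM (what is proved, stated in full; the proofs are below) =====
def Claim_equal_FindMinRow : Prop := ∀ (lists : List (List Int)), Dom_FindMinRow lists → Spec_FindMinRow lists (FindMinRow lists)

-- ===== LEMMAS AND PROOFS =====

lemma pyGetD_append_singleton_of_lt (l : List Int) (y : Int) (i : Int) (d : Int)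
    (h0 : 0 ≤ i) (h1 : i < (l.length : Int)) :
    PySem.List.pyGetD (l ++ [y]) i d = PySem.List.pyGetD l i d := by
  rw [PySem.List.pyGetD_eq_getElem _ d h0 (by simp; omega),
      PySem.List.pyGetD_eq_getElem _ d h0 (by exact_mod_cast h1)]
  exact List.getElem_append_left (by omega)

-- one step of A's loop, from the sums-list x :: t' to x :: (t' ++ [y])
lemma findmin_step (x : Int) (t' : List Int) (y : Int)
    (ih : ((PySem.List.pyRange 1 (((x :: t').length : Int)) 1).foldl
      (fun (st : Int × Int) i =>
        if PySem.List.pyGetD (x :: t') i 0 < st.2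
        then (i, PySem.List.pyGetD (x :: t') i 0)
        else st)
      ((0 : Int), x))
    = ((((PySem.List.index? (x :: t') (t'.foldl min x)).getD 0 : Nat) : Int), t'.foldl min x)) :
    ((PySem.List.pyRange 1 (((x :: (t' ++ [y])).length : Int)) 1).foldl
      (fun (st : Int × Int) i =>
        if PySem.List.pyGetD (x :: (t' ++ [y])) i 0 < st.2
        then (i, PySem.List.pyGetD (x :: (t' ++ [y])) i 0)
        else st)
      ((0 : Int), x))
    = ((((PySem.List.index? (x :: (t' ++ [y])) ((t' ++ [y]).foldl min x)).getD 0 : Nat) : Int), (t' ++ [y]).foldl min x) := by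
  have hm' := PySem.List.min?_id_cons x t'
  have hmin : ∀ z ∈ x :: t', t'.foldl min x ≤ z := fun z hz => PySem.List.min?_isMin hm' z hz
  have hmem : t'.foldl min x ∈ x :: t' := PySem.List.min?_mem hm'
  have hlen : ((x :: (t' ++ [y])).length : Int) = ((x :: t').length : Int) + 1 := by
    simp
  have hn : (1 : Int) ≤ ((x :: t').length : Int) := by simp
  rw [hlen, PySem.List.pyRange_one_succ_right hn, List.foldl_append]
  have hcongr : (PySem.List.pyRange 1 (((x :: t').length : Int)) 1).foldl
      (fun (st : Int × Int) i =>
        if PySem.List.pyGetD (x :: (t' ++ [y])) i 0 < st.2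
        then (i, PySem.List.pyGetD (x :: (t' ++ [y])) i 0)
        else st)
      ((0 : Int), x)
    = (PySem.List.pyRange 1 (((x :: t').length : Int)) 1).foldl
      (fun (st : Int × Int) i =>
        if PySem.List.pyGetD (x :: t') i 0 < st.2
        then (i, PySem.List.pyGetD (x :: t') i 0)
        else st)
      ((0 : Int), x) := by
    apply PySem.List.foldl_congr_mem
    intro acc i hi
    rw [PySem.List.mem_pyRange_one] at hi
    rw [← List.cons_append,
        pyGetD_append_singleton_of_lt _ _ _ _ (by omega) (by exact_mod_cast hi.2)]
  rw [hcongr, ih]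
  simp only [List.foldl_cons, List.foldl_nil]
  have hget : PySem.List.pyGetD (x :: (t' ++ [y])) (((x :: t').length : Int)) 0 = y := by
    rw [← List.cons_append,
        PySem.List.pyGetD_eq_getElem _ 0 (by positivity) (by simp)]
    simp
  rw [hget]
  have hfold : (t' ++ [y]).foldl min x = min (t'.foldl min x) y := by
    rw [List.foldl_append]; simp
  rw [hfold]
  by_cases hy : y < t'.foldl min x
  · rw [if_pos hy, min_eq_right (le_of_lt hy)]
    have hnotmem : y ∉ x :: t' := fun hc => absurd (hmin y hc) (by omega)
    rw [← List.cons_append, PySem.List.index?_append_singleton_self _ y hnotmem]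
    simp
  · rw [if_neg hy, min_eq_left (by omega), ← List.cons_append,
        PySem.List.index?_append_of_mem _ hmem]

-- A's loop over the sums list x :: t computes (first index of the minimum, the minimum)
lemma findmin_core (x : Int) (t : List Int) :
    ((PySem.List.pyRange 1 (((x :: t).length : Int)) 1).foldl
      (fun (st : Int × Int) i =>
        if PySem.List.pyGetD (x :: t) i 0 < st.2
        then (i, PySem.List.pyGetD (x :: t) i 0)
        else st)
      ((0 : Int), x))
    = ((((PySem.List.index? (x :: t) (t.foldl min x)).getD 0 : Nat) : Int), t.foldl min x) := by
  induction t using List.reverseRecOn with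
  | nil => simp [PySem.List.pyRange_one_eq_nil, PySem.List.index?]
  | append_singleton t' y ih => exact findmin_step x t' y ih

-- a row access followed by sum equals an access into the precomputed sums table
lemma sum_pyGetD_map (lists : List (List Int)) (i : Int)
    (h0 : 0 ≤ i) (h1 : i < (lists.length : Int)) :
    (PySem.List.pyGetD lists i []).sum = PySem.List.pyGetD (lists.map List.sum) i 0 := by
  rw [PySem.List.pyGetD_eq_getElem _ [] h0 (by exact_mod_cast h1),
      PySem.List.pyGetD_eq_getElem _ 0 h0 (by simp; exact_mod_cast h1)]
  simp

-- ===== VERDICT (by name: the statement is the Claim_ definition above) =====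
theorem FindMinRow_spec : Claim_equal_FindMinRow := by
  intro lists _
  unfold Spec_FindMinRow FindMinRow FindMinRow_alt
  cases lists with
  | nil => simp [PySem.List.min?]
  | cons r rs =>
    simp only [List.length_cons, beq_iff_eq, Nat.succ_ne_zero, if_false]
    have hcongr : (PySem.List.pyRange 1 (((r :: rs).length : Int)) 1).foldl
        (fun (st : Int × Int) i =>
          if (PySem.List.pyGetD (r :: rs) i []).sum < st.2
          then (i, (PySem.List.pyGetD (r :: rs) i []).sum)
          else st)
        ((0 : Int), (PySem.List.pyGetD (r :: rs) 0 []).sum)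
      = (PySem.List.pyRange 1 (((r.sum :: rs.map List.sum).length : Int)) 1).foldl
        (fun (st : Int × Int) i =>
          if PySem.List.pyGetD (r.sum :: rs.map List.sum) i 0 < st.2
          then (i, PySem.List.pyGetD (r.sum :: rs.map List.sum) i 0)
          else st)
        ((0 : Int), r.sum) := by
      have hl : (((r.sum :: rs.map List.sum).length : Int)) = (((r :: rs).length : Int)) := by simp
      rw [hl, show (PySem.List.pyGetD (r :: rs) 0 []).sum = r.sum by
            rw [PySem.List.pyGetD_zero_cons]]
      apply PySem.List.foldl_congr_mem
      intro acc i hi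
      rw [PySem.List.mem_pyRange_one] at hi
      rw [sum_pyGetD_map _ _ (by omega) (by exact_mod_cast hi.2)]
      rfl
    simp only [List.length_cons] at hcongr ⊢
    have hc := findmin_core r.sum (rs.map List.sum)
    simp only [List.length_cons] at hc
    rw [hcongr, hc]
    simp only [List.map_cons, PySem.List.min?_id_cons]
    have hmem : (rs.map List.sum).foldl min r.sum ∈ r.sum :: rs.map List.sum :=
      PySem.List.min?_mem (PySem.List.min?_id_cons r.sum (rs.map List.sum))
    obtain ⟨k, hk⟩ := Option.isSome_iff_exists.mp
      ((PySem.List.index?_isSome_iff _ _).mpr hmem)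
    rw [hk]
    rfl
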